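-- pv_equiv track=rewrite | github.com/brandlll-lee/cognify-eduAI | backend/app/services/ai_teacher.py | _extract_complete_json_from_start
-- ===== SOURCE A (Python) =====
-- from typing import List, Dict, Any, Optional
--
-- def _extract_complete_json_from_start(text: str) -> Optional[str]:
--     """
--     从文本开头提取完整的JSON对象
--     """
--     if not text.startswith('{'):
--         return None
--
--     bracket_count = 0
--     in_string = False
--     escape_next = False
--
--     for i, char in enumerate(text):
--         if escape_next:
--             escape_next = False
--             continue
--
--         if char == '\\':
--             escape_next = True
--             continue
--
--         if char == '"' and not escape_next:
--             in_string = not in_string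
--             continue
--
--         if not in_string:
--             if char == '{':
--                 bracket_count += 1
--             elif char == '}':
--                 bracket_count -= 1
--                 if bracket_count == 0:
--                     return text[:i+1]
--
--     # 如果没有找到完整的JSON，返回None
--     return None
-- ===== SOURCE B (Python) =====
-- from typing import Optional
--
-- def _extract_complete_json_from_start(text: str) -> Optional[str]:
--     """Extract the first complete JSON object from the start of text."""
--     if not text.startswith('{'):
--         return None
--     n = len(text)
--     depth = 0
--     i = 0
--     while i < n:
--         c = text[i]
--         if c == '\\':
--             i += 2            # a backslash escapes the next character
--             continue
--         if c == '"':
--             j = i + 1         # consume the string body up to the closing quote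
--             while j < n:
--                 d = text[j]
--                 if d == '\\':
--                     j += 2
--                 elif d == '"':
--                     break
--                 else:
--                     j += 1
--             if j >= n:
--                 return None   # unterminated string
--             i = j + 1
--             continue
--         if c == '{':
--             depth += 1
--         elif c == '}':
--             depth -= 1
--             if depth == 0:
--                 return text[:i + 1]
--         i += 1
--     return None
-- ===== Notes on version B (the rewrite author's own statement) =====
-- stated objective: alternative
-- what changed: Replaces A's per-character scan with in_string/escape_next boolean flags by an index-skipping while loop that keeps only a brace-depth counter, jumps two positions over a backslash escape, and consumes each quoted string in a dedicated inner loop.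
import Mathlib
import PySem

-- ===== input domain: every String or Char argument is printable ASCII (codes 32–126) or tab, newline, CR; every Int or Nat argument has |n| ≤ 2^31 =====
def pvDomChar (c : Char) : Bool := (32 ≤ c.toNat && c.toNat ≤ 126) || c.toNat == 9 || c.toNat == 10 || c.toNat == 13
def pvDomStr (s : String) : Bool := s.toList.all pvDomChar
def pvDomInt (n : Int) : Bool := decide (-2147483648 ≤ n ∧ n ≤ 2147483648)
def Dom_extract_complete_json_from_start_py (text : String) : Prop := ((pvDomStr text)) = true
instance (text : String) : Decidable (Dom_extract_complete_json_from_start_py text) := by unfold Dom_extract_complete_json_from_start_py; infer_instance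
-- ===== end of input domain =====

-- B replaces A's per-character boolean flags (in_string / escape_next) by an index-skipping
-- scan with a dedicated inner string-consuming loop; same return value, similar cost (alternative decomposition).

-- ===== PORT A =====
-- A's for-loop over enumerate(text): state = (bracket_count, in_string, escape_next);
-- `acc` holds the chars already consumed (reversed), so `text[:i+1]` = (c :: acc).reverse.
def pvAloop : List Char → List Char → Int → Bool → Bool → Option String
  | [], _, _, _, _ => none
  | c :: rest, acc, cnt, ins, esc =>
    if esc then pvAloop rest (c :: acc) cnt ins false
    else if c = '\\' then pvAloop rest (c :: acc) cnt ins true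
    else if c = '"' then pvAloop rest (c :: acc) cnt (!ins) esc
    else if !ins then
      if c = '{' then pvAloop rest (c :: acc) (cnt + 1) ins esc
      else if c = '}' then
        if cnt - 1 = 0 then some (String.ofList (c :: acc).reverse)
        else pvAloop rest (c :: acc) (cnt - 1) ins esc
      else pvAloop rest (c :: acc) cnt ins esc
    else pvAloop rest (c :: acc) cnt ins esc

def extract_complete_json_from_start_py (text : String) : Option String :=
  if PySem.Str.startswith text "{" then pvAloop text.toList [] 0 false false
  else none

-- ===== PORT B =====
-- B's inner while loop: consume a string body up to its unescaped closing quote;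
-- returns (remaining chars after the closing quote, consumed chars pushed on acc), none if unterminated.
def pvBstring : List Char → List Char → Option (List Char × List Char)
  | [], _ => none
  | d :: rest, acc =>
    if d = '\\' then
      match rest with
      | [] => none
      | e :: rest' => pvBstring rest' (e :: d :: acc)
    else if d = '"' then some (rest, d :: acc)
    else pvBstring rest (d :: acc)

theorem pvBstring_length : ∀ (cs acc r a : List Char),
    pvBstring cs acc = some (r, a) → r.length < cs.length := by
  intro cs acc r a h
  induction cs, acc using pvBstring.induct generalizing r a with
  | case1 => simp [pvBstring] at h
  | case2 => simp [pvBstring] at h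
  | case3 acc e rest' ih =>
    simp only [pvBstring] at h
    have := ih _ _ h; simp; omega
  | case4 rest acc hne =>
    simp [pvBstring.eq_def] at h
    simp [← h.1]
  | case5 d rest acc hd hq ih =>
    rw [pvBstring.eq_def] at h; simp [hd, hq] at h
    have := ih _ _ h; simp; omega

-- B's outer while loop over the index, carrying only the brace depth.
def pvBouter : List Char → List Char → Int → Option String
  | [], _, _ => none
  | c :: rest, acc, depth =>
    if c = '\\' then
      match rest with
      | [] => none
      | d :: rest' => pvBouter rest' (d :: c :: acc) depth
    else if c = '"' then
      match h : pvBstring rest (c :: acc) with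
      | none => none
      | some (rest', acc') => pvBouter rest' acc' depth
    else if c = '{' then pvBouter rest (c :: acc) (depth + 1)
    else if c = '}' then
      if depth - 1 = 0 then some (String.ofList (c :: acc).reverse)
      else pvBouter rest (c :: acc) (depth - 1)
    else pvBouter rest (c :: acc) depth
termination_by cs _ _ => cs.length
decreasing_by
  all_goals first
    | exact Nat.lt_succ_of_lt (pvBstring_length _ _ _ _ h)
    | simp

def extract_complete_json_from_start_py_alt (text : String) : Option String :=
  if PySem.Str.startswith text "{" then pvBouter text.toList [] 0
  else none

-- ===== PRECONDITION & SPEC =====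
def Spec_extract_complete_json_from_start_py (text : String) (out : Option String) : Prop := out = extract_complete_json_from_start_py_alt text
instance (text : String) (out : Option String) : Decidable (Spec_extract_complete_json_from_start_py text out) := by unfold Spec_extract_complete_json_from_start_py; infer_instance

-- ===== CLAIM (what is proved, stated in full; the proofs are below) =====
def Claim_equal_extract_complete_json_from_start_py : Prop := ∀ (text : String), Dom_extract_complete_json_from_start_py text → Spec_extract_complete_json_from_start_py text (extract_complete_json_from_start_py text)

-- ===== LEMMAS AND PROOFS =====

-- One-step unfolding lemmas for the two loops.
theorem pvAloop_nil (acc : List Char) (cnt : Int) (ins esc : Bool) :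
    pvAloop [] acc cnt ins esc = none := by rw [pvAloop.eq_def]

theorem pvAloop_esc (c : Char) (rest acc : List Char) (cnt : Int) (ins : Bool) :
    pvAloop (c :: rest) acc cnt ins true = pvAloop rest (c :: acc) cnt ins false := by
  rw [pvAloop.eq_def]; simp

theorem pvAloop_bs (rest acc : List Char) (cnt : Int) (ins : Bool) :
    pvAloop ('\\' :: rest) acc cnt ins false = pvAloop rest ('\\' :: acc) cnt ins true := by
  rw [pvAloop.eq_def]; simp

theorem pvAloop_quote (rest acc : List Char) (cnt : Int) (ins : Bool) :
    pvAloop ('"' :: rest) acc cnt ins false = pvAloop rest ('"' :: acc) cnt (!ins) false := by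
  rw [pvAloop.eq_def]; simp

theorem pvAloop_open (rest acc : List Char) (cnt : Int) :
    pvAloop ('{' :: rest) acc cnt false false = pvAloop rest ('{' :: acc) (cnt + 1) false false := by
  rw [pvAloop.eq_def]; simp

theorem pvAloop_close (rest acc : List Char) (cnt : Int) :
    pvAloop ('}' :: rest) acc cnt false false =
      (if cnt - 1 = 0 then some (String.ofList ('}' :: acc).reverse)
       else pvAloop rest ('}' :: acc) (cnt - 1) false false) := by
  rw [pvAloop.eq_def]; simp

theorem pvAloop_other (c : Char) (rest acc : List Char) (cnt : Int)
    (hb : ¬c = '\\') (hq : ¬c = '"') (ho : ¬c = '{') (hc : ¬c = '}') :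
    pvAloop (c :: rest) acc cnt false false = pvAloop rest (c :: acc) cnt false false := by
  rw [pvAloop.eq_def]; simp [hb, hq, ho, hc]

theorem pvAloop_instr (c : Char) (rest acc : List Char) (cnt : Int)
    (hb : ¬c = '\\') (hq : ¬c = '"') :
    pvAloop (c :: rest) acc cnt true false = pvAloop rest (c :: acc) cnt true false := by
  rw [pvAloop.eq_def]; simp [hb, hq]

theorem pvBouter_nil (acc : List Char) (cnt : Int) : pvBouter [] acc cnt = none := by
  rw [pvBouter.eq_def]

theorem pvBouter_bs_nil (acc : List Char) (cnt : Int) :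
    pvBouter ['\\'] acc cnt = none := by
  rw [pvBouter.eq_def]; simp

theorem pvBouter_bs_cons (d : Char) (rest' acc : List Char) (cnt : Int) :
    pvBouter ('\\' :: d :: rest') acc cnt = pvBouter rest' (d :: '\\' :: acc) cnt := by
  rw [pvBouter.eq_def]; simp

theorem pvBouter_quote (rest acc : List Char) (cnt : Int) :
    pvBouter ('"' :: rest) acc cnt =
      (match pvBstring rest ('"' :: acc) with
       | none => none
       | some (rest', acc') => pvBouter rest' acc' cnt) := by
  rw [pvBouter.eq_def]
  simp only [reduceIte, if_neg (by decide : ¬('"' : Char) = '\\')]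
  split <;> simp_all

theorem pvBouter_open (rest acc : List Char) (cnt : Int) :
    pvBouter ('{' :: rest) acc cnt = pvBouter rest ('{' :: acc) (cnt + 1) := by
  rw [pvBouter.eq_def]; simp

theorem pvBouter_close (rest acc : List Char) (cnt : Int) :
    pvBouter ('}' :: rest) acc cnt =
      (if cnt - 1 = 0 then some (String.ofList ('}' :: acc).reverse)
       else pvBouter rest ('}' :: acc) (cnt - 1)) := by
  rw [pvBouter.eq_def]; simp

theorem pvBouter_other (c : Char) (rest acc : List Char) (cnt : Int)
    (hb : ¬c = '\\') (hq : ¬c = '"') (ho : ¬c = '{') (hc : ¬c = '}') :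
    pvBouter (c :: rest) acc cnt = pvBouter rest (c :: acc) cnt := by
  rw [pvBouter.eq_def]; simp [hb, hq, ho, hc]

theorem pvBstring_nil (acc : List Char) : pvBstring [] acc = none := by
  rw [pvBstring.eq_def]

theorem pvBstring_bs_nil (acc : List Char) : pvBstring ['\\'] acc = none := by
  rw [pvBstring.eq_def]; simp

theorem pvBstring_bs_cons (d : Char) (rest' acc : List Char) :
    pvBstring ('\\' :: d :: rest') acc = pvBstring rest' (d :: '\\' :: acc) := by
  rw [pvBstring.eq_def]; simp

theorem pvBstring_quote (rest acc : List Char) :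
    pvBstring ('"' :: rest) acc = some (rest, '"' :: acc) := by
  rw [pvBstring.eq_def]; simp

theorem pvBstring_other (c : Char) (rest acc : List Char) (hb : ¬c = '\\') (hq : ¬c = '"') :
    pvBstring (c :: rest) acc = pvBstring rest (c :: acc) := by
  rw [pvBstring.eq_def]; simp [hb, hq]

-- A's loop in state in_string = false (resp. true), escape_next = false, equals B's
-- outer loop (resp. B's string consumer followed by B's outer loop).
theorem pvA_eq_pvB : ∀ (n : Nat) (cs : List Char), cs.length ≤ n →
    (∀ (acc : List Char) (cnt : Int), pvAloop cs acc cnt false false = pvBouter cs acc cnt) ∧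
    (∀ (acc : List Char) (cnt : Int),
      pvAloop cs acc cnt true false =
        (match pvBstring cs acc with
         | none => none
         | some (rest', acc') => pvBouter rest' acc' cnt)) := by
  intro n
  induction n with
  | zero =>
    intro cs hcs
    have : cs = [] := List.eq_nil_of_length_eq_zero (Nat.le_zero.mp hcs)
    subst this
    exact ⟨fun acc cnt => by rw [pvAloop_nil, pvBouter_nil],
           fun acc cnt => by rw [pvAloop_nil, pvBstring_nil]⟩
  | succ n ih =>
    intro cs hcs
    match cs with
    | [] =>
      exact ⟨fun acc cnt => by rw [pvAloop_nil, pvBouter_nil],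
             fun acc cnt => by rw [pvAloop_nil, pvBstring_nil]⟩
    | c :: rest =>
      have hrest : rest.length ≤ n := by simp at hcs; omega
      constructor <;> intro acc cnt
      · -- outer state: in_string = false, escape_next = false
        by_cases hb : c = '\\'
        · subst hb
          match rest with
          | [] => rw [pvAloop_bs, pvAloop_nil, pvBouter_bs_nil]
          | d :: rest' =>
            have hr' : rest'.length ≤ n := by simp at hrest; omega
            rw [pvAloop_bs, pvAloop_esc, pvBouter_bs_cons]
            exact (ih rest' hr').1 (d :: '\\' :: acc) cnt
        · by_cases hq : c = '"'
          · subst hq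
            rw [pvAloop_quote, pvBouter_quote]
            exact (ih rest hrest).2 ('"' :: acc) cnt
          · by_cases ho : c = '{'
            · subst ho
              rw [pvAloop_open, pvBouter_open]
              exact (ih rest hrest).1 ('{' :: acc) (cnt + 1)
            · by_cases hc : c = '}'
              · subst hc
                rw [pvAloop_close, pvBouter_close]
                by_cases h0 : cnt - 1 = 0
                · rw [if_pos h0, if_pos h0]
                · rw [if_neg h0, if_neg h0]
                  exact (ih rest hrest).1 ('}' :: acc) (cnt - 1)
              · rw [pvAloop_other c rest acc cnt hb hq ho hc,
                    pvBouter_other c rest acc cnt hb hq ho hc]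
                exact (ih rest hrest).1 (c :: acc) cnt
      · -- string state: in_string = true, escape_next = false
        by_cases hb : c = '\\'
        · subst hb
          match rest with
          | [] => rw [pvAloop_bs, pvAloop_nil, pvBstring_bs_nil]
          | d :: rest' =>
            have hr' : rest'.length ≤ n := by simp at hrest; omega
            rw [pvAloop_bs, pvAloop_esc, pvBstring_bs_cons]
            exact (ih rest' hr').2 (d :: '\\' :: acc) cnt
        · by_cases hq : c = '"'
          · subst hq
            rw [pvAloop_quote, pvBstring_quote]
            exact (ih rest hrest).1 ('"' :: acc) cnt
          · rw [pvAloop_instr c rest acc cnt hb hq, pvBstring_other c rest acc hb hq]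
            exact (ih rest hrest).2 (c :: acc) cnt

-- ===== VERDICT (by name: the statement is the Claim_ definition above) =====
theorem extract_complete_json_from_start_py_spec : Claim_equal_extract_complete_json_from_start_py := by
  intro text _
  unfold Spec_extract_complete_json_from_start_py extract_complete_json_from_start_py extract_complete_json_from_start_py_alt
  split
  · exact (pvA_eq_pvB text.toList.length text.toList le_rfl).1 [] 0
  · rfl
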